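-- pv_equiv track=rewrite | github.com/AnchalNigam/Code-Time | CP/new_journey/facebokhackercup/secondHands.py | secondHands
-- ===== SOURCE A (Python) =====
-- def secondHands(sArr, capacity, n):
--   if n > (capacity*2):
--     return 'NO'
--   c = {}
--   # c1Count = 0
--   # c2Count = 0
--   for num in sArr:
--     if num not in c:
--       c[num] = 1
--     else:
--       c[num] += 1
--       if c[num] > 2:
--         return 'NO'
--
--   return 'YES'
-- ===== SOURCE B (Python) =====
-- def secondHands(sArr, capacity, n):
--   if n > capacity * 2:
--     return 'NO'
--   s = sorted(sArr)
--   prev = None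
--   run = 1
--   for v in s:
--     run = run + 1 if v == prev else 1
--     if run == 3:
--       return 'NO'
--     prev = v
--   return 'YES'
-- ===== Notes on version B (the rewrite author's own statement) =====
-- stated objective: alternative
-- what changed: Replaces hash-map counting with sort-then-single-linear-scan: sort the list and walk it once with a run-length counter that resets on each value change, failing when a run reaches 3 (duplicates are adjacent in sorted order, so a value occurring >2 times is exactly a run of length 3).
import Mathlib
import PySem

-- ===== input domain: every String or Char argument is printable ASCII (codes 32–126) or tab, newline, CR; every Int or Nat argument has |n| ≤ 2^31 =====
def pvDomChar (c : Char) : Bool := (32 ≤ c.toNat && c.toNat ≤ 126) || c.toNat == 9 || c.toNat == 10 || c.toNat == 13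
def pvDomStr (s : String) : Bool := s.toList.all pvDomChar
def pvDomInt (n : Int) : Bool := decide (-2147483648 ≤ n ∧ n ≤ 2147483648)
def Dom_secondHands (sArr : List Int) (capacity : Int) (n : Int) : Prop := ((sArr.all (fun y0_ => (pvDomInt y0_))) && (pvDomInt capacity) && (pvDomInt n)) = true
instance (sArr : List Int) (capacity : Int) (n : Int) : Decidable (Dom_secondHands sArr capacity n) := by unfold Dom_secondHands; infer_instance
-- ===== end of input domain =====

-- B replaces A's hash-map counting by sort-then-one-linear-run-length-scan (alternative
-- algorithm, similar cost; not claimed faster).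

-- ===== PORT A =====
-- the 'for num in sArr' loop over the counting dict, with its early 'return NO'
def secondHandsLoop : List Int → PySem.Dict Int Int → String
  | [], _ => "YES"
  | num :: rest, c =>
    if c.contains num = false then
      secondHandsLoop rest (c.insert num 1)
    else
      let c' := c.insert num (c.getD num 0 + 1)
      if c'.getD num 0 > 2 then "NO" else secondHandsLoop rest c'

def secondHands (sArr : List Int) (capacity : Int) (n : Int) : String :=
  if n > capacity * 2 then "NO"
  else secondHandsLoop sArr PySem.Dict.empty

-- ===== PORT B =====
-- the 'for v in s' run-length scan: prev starts as None (Option Int), run resets to 1 on a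
-- value change; 'return NO' when a run reaches 3
def runLoop : List Int → Option Int → Int → String
  | [], _, _ => "YES"
  | v :: rest, prev, run =>
    let run' := if some v = prev then run + 1 else 1
    if run' = 3 then "NO" else runLoop rest (some v) run'

def secondHands_alt (sArr : List Int) (capacity : Int) (n : Int) : String :=
  if n > capacity * 2 then "NO"
  else runLoop (PySem.List.sorted sArr (fun x => x) false) none 1

-- ===== PRECONDITION & SPEC =====
def Spec_secondHands (sArr : List Int) (capacity : Int) (n : Int) (out : String) : Prop := out = secondHands_alt sArr capacity n
instance (sArr : List Int) (capacity : Int) (n : Int) (out : String) : Decidable (Spec_secondHands sArr capacity n out) := by unfold Spec_secondHands; infer_instance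

-- ===== CLAIM (what is proved, stated in full; the proofs are below) =====
def Claim_equal_secondHands : Prop := ∀ (sArr : List Int) (capacity : Int) (n : Int), Dom_secondHands sArr capacity n → Spec_secondHands sArr capacity n (secondHands sArr capacity n)

-- ===== LEMMAS AND PROOFS =====

-- A's loop answers "YES" or "NO" only
lemma secondHandsLoop_cases (l : List Int) (c : PySem.Dict Int Int) :
    secondHandsLoop l c = "YES" ∨ secondHandsLoop l c = "NO" := by
  induction l generalizing c with
  | nil => left; rfl
  | cons num rest ih =>
    simp only [secondHandsLoop]
    cases hcb : c.contains num with
    | false =>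
      rw [if_pos (rfl : (false:Bool) = false)]
      exact ih _
    | true =>
      rw [if_neg (by simp)]
      split
      · right; rfl
      · exact ih _

-- A's loop answers "YES" iff no element's dict value plus remaining count exceeds 2
lemma secondHandsLoop_yes_iff (l : List Int) (c : PySem.Dict Int Int) :
    secondHandsLoop l c = "YES" ↔ ∀ x ∈ l, c.getD x 0 + (l.count x : Int) ≤ 2 := by
  induction l generalizing c with
  | nil => simp [secondHandsLoop]
  | cons num rest ih =>
    simp only [secondHandsLoop]
    cases hcb : c.contains num with
    | false =>
      rw [if_pos (rfl : (false:Bool) = false), ih]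
      have h0 : c.getD num 0 = 0 := PySem.Dict.getD_of_not_contains c 0 hcb
      constructor
      · intro H x hx
        rcases eq_or_ne x num with rfl | hne
        · rw [h0, List.count_cons_self]
          by_cases hmem : x ∈ rest
          · have := H x hmem
            rw [PySem.Dict.getD_insert] at this
            simp at this
            omega
          · rw [List.count_eq_zero_of_not_mem hmem]; omega
        · have hx' : x ∈ rest := by
            rcases List.mem_cons.mp hx with h' | h'
            · exact absurd h' hne
            · exact h'
          have := H x hx'
          rw [PySem.Dict.getD_insert, if_neg hne] at this
          have hcnt : (num :: rest).count x = rest.count x := by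
            simp [Ne.symm hne]
          rw [hcnt]
          exact this
      · intro H x hx
        rw [PySem.Dict.getD_insert]
        rcases eq_or_ne x num with rfl | hne
        · have := H x List.mem_cons_self
          rw [h0, List.count_cons_self] at this
          simp
          omega
        · rw [if_neg hne]
          have := H x (List.mem_cons_of_mem _ hx)
          have hcnt : (num :: rest).count x = rest.count x := by
            simp [Ne.symm hne]
          rw [hcnt] at this
          exact this
    | true =>
      rw [if_neg (by simp)]
      simp only [PySem.Dict.getD_insert_self]
      by_cases hgt : c.getD num 0 + 1 > 2
      · rw [if_pos hgt]
        constructor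
        · intro hNO; exact absurd hNO (by decide)
        · intro H
          have := H num List.mem_cons_self
          rw [List.count_cons_self] at this
          exfalso; omega
      · rw [if_neg hgt, ih]
        constructor
        · intro H x hx
          rcases eq_or_ne x num with rfl | hne
          · rw [List.count_cons_self]
            by_cases hmem : x ∈ rest
            · have := H x hmem
              rw [PySem.Dict.getD_insert_self] at this
              omega
            · rw [List.count_eq_zero_of_not_mem hmem]; omega
          · have hx' : x ∈ rest := by
              rcases List.mem_cons.mp hx with h' | h'
              · exact absurd h' hne
              · exact h'
            have := H x hx'
            rw [PySem.Dict.getD_insert, if_neg hne] at this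
            have hcnt : (num :: rest).count x = rest.count x := by
              simp [Ne.symm hne]
            rw [hcnt]
            exact this
        · intro H x hx
          rw [PySem.Dict.getD_insert]
          rcases eq_or_ne x num with rfl | hne
          · have := H x List.mem_cons_self
            rw [List.count_cons_self] at this
            simp
            omega
          · rw [if_neg hne]
            have := H x (List.mem_cons_of_mem _ hx)
            have hcnt : (num :: rest).count x = rest.count x := by
              simp [Ne.symm hne]
            rw [hcnt] at this
            exact this

-- count of x in (v :: l) when x ≠ v
lemma count_cons_ne' (x v : Int) (l : List Int) (h : x ≠ v) :
    (v :: l).count x = l.count x := by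
  have h' : ¬ v = x := fun hh => h hh.symm
  simp [h']

-- B's run scan from state (some p, r) on a sorted tail whose elements are all ≥ p:
-- "YES" iff the pending run r plus the remaining p's stays ≤ 2 and every other value has count ≤ 2
lemma runLoop_some_yes_iff (l : List Int) (p : Int) (r : Int)
    (hr1 : 1 ≤ r) (hr2 : r ≤ 2)
    (hs : l.Pairwise (· ≤ ·)) (hp : ∀ x ∈ l, p ≤ x) :
    runLoop l (some p) r = "YES" ↔
      (r + (l.count p : Int) ≤ 2 ∧ ∀ x ∈ l, x ≠ p → (l.count x : Int) ≤ 2) := by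
  induction l generalizing p r with
  | nil => simp [runLoop]; omega
  | cons v rest ih =>
    have hrest : rest.Pairwise (· ≤ ·) := hs.tail
    have hvle : ∀ x ∈ rest, v ≤ x := by
      intro x hx; exact (List.pairwise_cons.mp hs).1 x hx
    simp only [runLoop, Option.some.injEq]
    rcases eq_or_ne v p with rfl | hne
    · -- v = p : run extends
      rw [if_pos rfl]
      by_cases h3 : r + 1 = 3
      · rw [if_pos h3]
        constructor
        · intro h; exact absurd h (by decide)
        · rintro ⟨h1, -⟩
          rw [List.count_cons_self] at h1
          exfalso; push_cast at h1; omega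
      · rw [if_neg h3]
        have hr2' : r + 1 ≤ 2 := by omega
        rw [ih v (r + 1) (by omega) hr2' hrest hvle]
        constructor
        · rintro ⟨h1, h2⟩
          refine ⟨?_, ?_⟩
          · rw [List.count_cons_self]; push_cast; omega
          · intro x hx hxv
            have hx' : x ∈ rest := by
              rcases List.mem_cons.mp hx with h' | h'
              · exact absurd h' hxv
              · exact h'
            rw [count_cons_ne' x v rest hxv]
            exact h2 x hx' hxv
        · rintro ⟨h1, h2⟩
          refine ⟨?_, ?_⟩
          · rw [List.count_cons_self] at h1; push_cast at h1 ⊢; omega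
          · intro x hx hxv
            have := h2 x (List.mem_cons_of_mem _ hx) hxv
            rw [count_cons_ne' x v rest hxv] at this
            exact this
    · -- v ≠ p : run resets to 1; p never occurs again (p < v ≤ everything ahead)
      have hpv : p < v := lt_of_le_of_ne (hp v List.mem_cons_self) fun h => hne h.symm
      have hpcount : (v :: rest).count p = 0 := by
        apply List.count_eq_zero_of_not_mem
        intro hmem
        rcases List.mem_cons.mp hmem with h' | h'
        · exact (ne_of_lt hpv) h'
        · exact absurd (hvle p h') (not_le.mpr hpv)
      rw [if_neg hne, if_neg (by decide)]
      rw [ih v 1 (le_refl 1) (by norm_num) hrest hvle]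
      constructor
      · rintro ⟨h1, h2⟩
        refine ⟨?_, ?_⟩
        · rw [hpcount]; push_cast; omega
        · intro x hx hxp
          rcases eq_or_ne x v with rfl | hxv
          · rw [List.count_cons_self]; push_cast at h1 ⊢; omega
          · have hx' : x ∈ rest := by
              rcases List.mem_cons.mp hx with h' | h'
              · exact absurd h' hxv
              · exact h'
            rw [count_cons_ne' x v rest hxv]
            exact h2 x hx' hxv
      · rintro ⟨-, h2⟩
        refine ⟨?_, ?_⟩
        · have := h2 v List.mem_cons_self hne
          rw [List.count_cons_self] at this
          push_cast at this ⊢; omega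
        · intro x hx hxv
          rcases eq_or_ne x p with rfl | hxp
          · exfalso
            have hmem : x ∈ v :: rest := List.mem_cons_of_mem _ hx
            have := List.count_pos_iff.mpr hmem
            omega
          · have := h2 x (List.mem_cons_of_mem _ hx) hxp
            rw [count_cons_ne' x v rest hxv] at this
            exact this

-- B's whole scan on a sorted list: "YES" iff every count ≤ 2
lemma runLoop_yes_iff (l : List Int) (hs : l.Pairwise (· ≤ ·)) :
    runLoop l none 1 = "YES" ↔ ∀ x ∈ l, (l.count x : Int) ≤ 2 := by
  cases l with
  | nil => simp [runLoop]
  | cons v rest =>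
    have hrest : rest.Pairwise (· ≤ ·) := hs.tail
    have hvle : ∀ x ∈ rest, v ≤ x := fun x hx => (List.pairwise_cons.mp hs).1 x hx
    have hstep : runLoop (v :: rest) none 1 = runLoop rest (some v) 1 := by
      simp [runLoop]
    rw [hstep, runLoop_some_yes_iff rest v 1 (le_refl 1) (by norm_num) hrest hvle]
    constructor
    · rintro ⟨h1, h2⟩ x hx
      rcases eq_or_ne x v with rfl | hxv
      · rw [List.count_cons_self]; push_cast at h1 ⊢; omega
      · have hx' : x ∈ rest := by
          rcases List.mem_cons.mp hx with h' | h'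
          · exact absurd h' hxv
          · exact h'
        rw [count_cons_ne' x v rest hxv]
        exact h2 x hx' hxv
    · intro H
      refine ⟨?_, ?_⟩
      · have := H v List.mem_cons_self
        rw [List.count_cons_self] at this
        push_cast at this ⊢; omega
      · intro x hx hxv
        have := H x (List.mem_cons_of_mem _ hx)
        rw [count_cons_ne' x v rest hxv] at this
        exact this

-- B's scan answers "YES" or "NO" only
lemma runLoop_cases (l : List Int) (prev : Option Int) (r : Int) :
    runLoop l prev r = "YES" ∨ runLoop l prev r = "NO" := by
  induction l generalizing prev r with
  | nil => left; rfl
  | cons v rest ih =>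
    simp only [runLoop]
    by_cases h : (if some v = prev then r + 1 else 1) = 3
    · rw [if_pos h]; right; rfl
    · rw [if_neg h]; exact ih _ _

-- ===== VERDICT (by name: the statement is the Claim_ definition above) =====
theorem secondHands_spec : Claim_equal_secondHands := by
  intro sArr capacity n _
  unfold Spec_secondHands secondHands secondHands_alt
  by_cases hg : n > capacity * 2
  · rw [if_pos hg, if_pos hg]
  · rw [if_neg hg, if_neg hg]
    set s := PySem.List.sorted sArr (fun x => x) false with hsdef
    have hperm : s.Perm sArr := PySem.List.sorted_perm sArr (fun x => x) false
    have hsorted : s.Pairwise (· ≤ ·) := by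
      simpa using PySem.List.sorted_pairwise (xs := sArr) (key := fun x => x)
    have hiff : secondHandsLoop sArr PySem.Dict.empty = "YES" ↔ runLoop s none 1 = "YES" := by
      rw [secondHandsLoop_yes_iff, runLoop_yes_iff s hsorted]
      constructor
      · intro H x hx
        have hx' : x ∈ sArr := hperm.mem_iff.mp hx
        have := H x hx'
        rw [PySem.Dict.getD_empty] at this
        rw [hperm.count_eq]
        omega
      · intro H x hx
        have hx' : x ∈ s := hperm.mem_iff.mpr hx
        have := H x hx'
        rw [hperm.count_eq] at this
        rw [PySem.Dict.getD_empty]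
        omega
    rcases secondHandsLoop_cases sArr PySem.Dict.empty with hA | hA <;> rw [hA]
    · exact (hiff.mp hA).symm
    · rcases runLoop_cases s none 1 with hB | hB
      · exact absurd (hiff.mpr hB) (by rw [hA]; decide)
      · exact hB.symm
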